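-- pv_equiv track=rewrite | github.com/guillem-koa/aquagar-results-src | fetchdb-and-mails/utils.py | species2families
-- ===== SOURCE A (Python) =====
-- def species2families(input_dict):
--     # Define category mappings
--     category_mapping = {
--         'Vibrio': ['vharveyi', 'valgino', 'vangil'],
--         'Aeromonas': ['assalmonicida'],
--         'Photobacterium': ['pddamselae', 'pdpiscicida'],
--         'Staphyloccocus': ['staphylo-']
--     }
--
--     # Aggregate values based on categories
--     output_dict = {category: sum(input_dict.get(item, 0) for item in items) for category, items in category_mapping.items()}
--
--     return output_dict
-- ===== SOURCE B (Python) =====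
-- def species2families(input_dict):
--     # one pass, four plain counters; no dicts built for the aggregation
--     v = a = p = s = 0
--     for sp, val in input_dict.items():
--         if sp in ('vharveyi', 'valgino', 'vangil'):
--             v += val
--         elif sp == 'assalmonicida':
--             a += val
--         elif sp in ('pddamselae', 'pdpiscicida'):
--             p += val
--         elif sp == 'staphylo-':
--             s += val
--     return {'Vibrio': v, 'Aeromonas': a, 'Photobacterium': p, 'Staphyloccocus': s}
-- ===== Notes on version B (the rewrite author's own statement) =====
-- stated objective: alternative
-- what changed: Replaces A's per-category dict comprehension (summing input_dict.get over each category's species list into a dict) by a single scatter pass over input_dict.items() accumulating four plain integer counters, building the output dict once at the end.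
import Mathlib
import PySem

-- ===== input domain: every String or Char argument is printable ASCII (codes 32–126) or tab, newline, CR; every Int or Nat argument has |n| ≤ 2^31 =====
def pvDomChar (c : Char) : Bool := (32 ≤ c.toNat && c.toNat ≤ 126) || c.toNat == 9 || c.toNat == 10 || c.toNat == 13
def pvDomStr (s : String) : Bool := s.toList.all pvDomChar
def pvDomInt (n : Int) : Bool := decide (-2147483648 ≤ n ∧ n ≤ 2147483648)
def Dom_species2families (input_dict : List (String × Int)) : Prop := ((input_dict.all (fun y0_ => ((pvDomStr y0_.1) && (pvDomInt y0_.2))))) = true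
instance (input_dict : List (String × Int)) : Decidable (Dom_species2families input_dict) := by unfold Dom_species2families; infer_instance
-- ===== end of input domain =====

-- B replaces A's per-category gather (dict comprehension summing input_dict.get over each
-- category's species list) by one scatter pass accumulating four plain integer counters;
-- alternative decomposition, same cost.


-- ===== PORT A =====
-- dict comprehension over category_mapping.items(): for each category, sum input_dict.get(item, 0)
def species2families (input_dict : List (String × Int)) : List (String × Int) :=
  let categoryMapping : List (String × List String) :=
    [("Vibrio", ["vharveyi", "valgino", "vangil"]),
     ("Aeromonas", ["assalmonicida"]),
     ("Photobacterium", ["pddamselae", "pdpiscicida"]),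
     ("Staphyloccocus", ["staphylo-"])]
  let d : PySem.Dict String Int := PySem.Dict.mk input_dict
  (categoryMapping.foldl
    (fun out p => out.insert p.1 (p.2.foldl (fun s it => s + d.getD it 0) 0))
    PySem.Dict.empty).items

-- ===== PORT B =====
-- one pass over the items, four plain integer counters, output assembled once at the end
def species2families_alt (input_dict : List (String × Int)) : List (String × Int) :=
  let acc := input_dict.foldl
    (fun (t : Int × Int × Int × Int) kv =>
      let (v, a, p, s) := t
      if kv.1 = "vharveyi" ∨ kv.1 = "valgino" ∨ kv.1 = "vangil" then (v + kv.2, a, p, s)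
      else if kv.1 = "assalmonicida" then (v, a + kv.2, p, s)
      else if kv.1 = "pddamselae" ∨ kv.1 = "pdpiscicida" then (v, a, p + kv.2, s)
      else if kv.1 = "staphylo-" then (v, a, p, s + kv.2)
      else (v, a, p, s))
    (0, 0, 0, 0)
  [("Vibrio", acc.1), ("Aeromonas", acc.2.1),
   ("Photobacterium", acc.2.2.1), ("Staphyloccocus", acc.2.2.2)]

-- ===== PRECONDITION & SPEC =====
-- Pre_ excludes association lists with duplicate keys: the argument is a Python dict, which cannot
-- contain duplicate keys, so such lists are representation artefacts on which the ports' behaviours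
-- (first-match lookup vs. summing every entry) are both accidental.
def Pre_species2families (input_dict : List (String × Int)) : Prop :=
  (input_dict.map Prod.fst).Nodup
instance (input_dict : List (String × Int)) : Decidable (Pre_species2families input_dict) := by unfold Pre_species2families; infer_instance
def pvWitness_species2families : (List (String × Int)) := [("vharveyi", 2), ("foo", 1)]
def Spec_species2families (input_dict : List (String × Int)) (out : List (String × Int)) : Prop := out = species2families_alt input_dict
instance (input_dict : List (String × Int)) (out : List (String × Int)) : Decidable (Spec_species2families input_dict out) := by unfold Spec_species2families; infer_instance

-- ===== CLAIM =====
def Claim_equal_species2families : Prop := ∀ (input_dict : List (String × Int)), Dom_species2families input_dict → Pre_species2families input_dict → Spec_species2families input_dict (species2families input_dict)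

-- ===== LEMMAS AND PROOFS =====

-- first-match lookup of a key in the input dict, default 0 (what A's input_dict.get computes)
def pvGd (l : List (String × Int)) (k : String) : Int := (PySem.Dict.mk l).getD k 0

theorem pvGd_cons (k : String) (v : Int) (t : List (String × Int)) (s : String) :
    pvGd ((k, v) :: t) s = if k = s then v else pvGd t s := by
  simp [pvGd, PySem.Dict.getD_eq_get?_getD, PySem.Dict.get?_mk_cons]
  split_ifs <;> simp

theorem pvGd_not_mem (l : List (String × Int)) (k : String)
    (h : k ∉ l.map Prod.fst) : pvGd l k = 0 := by
  induction l with
  | nil => rfl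
  | cons p t ih =>
    rcases p with ⟨pk, pv⟩
    rw [List.map_cons] at h
    have h1 : pk ≠ k := fun he => h (by simp [he])
    have h2 : k ∉ t.map Prod.fst := fun hm => h (by simp [hm])
    rw [pvGd_cons, if_neg h1, ih h2]

theorem pvA_eval (l : List (String × Int)) :
    species2families l =
      [("Vibrio", 0 + pvGd l "vharveyi" + pvGd l "valgino" + pvGd l "vangil"),
       ("Aeromonas", 0 + pvGd l "assalmonicida"),
       ("Photobacterium", 0 + pvGd l "pddamselae" + pvGd l "pdpiscicida"),
       ("Staphyloccocus", 0 + pvGd l "staphylo-")] := rfl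

-- B's fold step, named so the invariant can be stated about it
def pvStepB (t : Int × Int × Int × Int) (kv : String × Int) : Int × Int × Int × Int :=
  let (v, a, p, s) := t
  if kv.1 = "vharveyi" ∨ kv.1 = "valgino" ∨ kv.1 = "vangil" then (v + kv.2, a, p, s)
  else if kv.1 = "assalmonicida" then (v, a + kv.2, p, s)
  else if kv.1 = "pddamselae" ∨ kv.1 = "pdpiscicida" then (v, a, p + kv.2, s)
  else if kv.1 = "staphylo-" then (v, a, p, s + kv.2)
  else (v, a, p, s)

theorem pvB_eval (l : List (String × Int)) :
    species2families_alt l =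
      (fun acc : Int × Int × Int × Int =>
        [("Vibrio", acc.1), ("Aeromonas", acc.2.1),
         ("Photobacterium", acc.2.2.1), ("Staphyloccocus", acc.2.2.2)])
        (l.foldl pvStepB (0, 0, 0, 0)) := rfl

theorem pvBfold (l : List (String × Int)) (hn : (l.map Prod.fst).Nodup) (a b c d : Int) :
    l.foldl pvStepB (a, b, c, d)
    = (a + (pvGd l "vharveyi" + pvGd l "valgino" + pvGd l "vangil"),
       b + pvGd l "assalmonicida",
       c + (pvGd l "pddamselae" + pvGd l "pdpiscicida"),
       d + pvGd l "staphylo-") := by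
  induction l generalizing a b c d with
  | nil => simp [show ∀ s : String, pvGd [] s = 0 from fun _ => rfl]
  | cons p t ih =>
    rcases p with ⟨k, v⟩
    rw [List.map_cons, List.nodup_cons] at hn
    have hk : k ∉ t.map Prod.fst := hn.1
    rw [List.foldl_cons, ih hn.2]
    by_cases h1 : k = "vharveyi"
    · subst h1; simp [pvStepB, pvGd_cons, pvGd_not_mem t _ hk]; ring
    by_cases h2 : k = "valgino"
    · subst h2; simp [pvStepB, pvGd_cons, pvGd_not_mem t _ hk]; ring
    by_cases h3 : k = "vangil"
    · subst h3; simp [pvStepB, pvGd_cons, pvGd_not_mem t _ hk]; ring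
    by_cases h4 : k = "assalmonicida"
    · subst h4; simp [pvStepB, h1, h2, h3, pvGd_cons, pvGd_not_mem t _ hk]
    by_cases h5 : k = "pddamselae"
    · subst h5; simp [pvStepB, h1, h2, h3, h4, pvGd_cons, pvGd_not_mem t _ hk]; ring
    by_cases h6 : k = "pdpiscicida"
    · subst h6; simp [pvStepB, h1, h2, h3, h4, h5, pvGd_cons, pvGd_not_mem t _ hk]; ring
    by_cases h7 : k = "staphylo-"
    · subst h7; simp [pvStepB, h1, h2, h3, h4, h5, h6, pvGd_cons, pvGd_not_mem t _ hk]
    · simp [pvStepB, h1, h2, h3, h4, h5, h6, h7, pvGd_cons]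

-- ===== VERDICT =====
theorem species2families_spec : Claim_equal_species2families := by
  intro l _ hpre
  unfold Spec_species2families
  rw [pvA_eval, pvB_eval, pvBfold l hpre]
  simp
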